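-- pv_equiv track=rewrite | github.com/SanchitKulkarni1/gitEQ | backend/app/analysis/layer_inference.py | infer_backend_layers
-- ===== SOURCE A (Python) =====
-- def infer_backend_layers(files):
--     layers = {
--         "api": [],
--         "services": [],
--         "models": [],
--         "db": [],
--         "utils": [],
--         "unknown": [],
--     }
--
--     for f in files:
--         if "/api/" in f or "/routes/" in f:
--             layers["api"].append(f)
--         elif "/service/" in f or "/services/" in f:
--             layers["services"].append(f)
--         elif "/model/" in f or "/models/" in f or "/schema/" in f:
--             layers["models"].append(f)
--         elif "/db/" in f or "/repository/" in f:
--             layers["db"].append(f)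
--         elif "/utils/" in f or "/core/" in f:
--             layers["utils"].append(f)
--         else:
--             layers["unknown"].append(f)
--
--     return layers
-- ===== SOURCE B (Python) =====
-- RULES = [
--     ("api", ("/api/", "/routes/")),
--     ("services", ("/service/", "/services/")),
--     ("models", ("/model/", "/models/", "/schema/")),
--     ("db", ("/db/", "/repository/")),
--     ("utils", ("/utils/", "/core/")),
-- ]
--
--
-- def infer_backend_layers(files):
--     # Staged sieve: one pass PER BUCKET that partitions the remaining files,
--     # instead of one pass over files dispatching each file to a bucket.
--     layers = {}
--     remaining = list(files)
--     for bucket, subs in RULES: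
--         matched, rest = [], []
--         for f in remaining:
--             (matched if any(s in f for s in subs) else rest).append(f)
--         layers[bucket] = matched
--         remaining = rest
--     layers["unknown"] = remaining
--     return layers
-- ===== Notes on version B (the rewrite author's own statement) =====
-- stated objective: alternative
-- what changed: Replaces A's single pass that dispatches each file through an if/elif chain into pre-initialized buckets by a staged sieve: one partition pass per bucket over the shrinking list of remaining files, with the leftovers becoming 'unknown'; priority is preserved because earlier passes remove their matches before later ones run.
import Mathlib
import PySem

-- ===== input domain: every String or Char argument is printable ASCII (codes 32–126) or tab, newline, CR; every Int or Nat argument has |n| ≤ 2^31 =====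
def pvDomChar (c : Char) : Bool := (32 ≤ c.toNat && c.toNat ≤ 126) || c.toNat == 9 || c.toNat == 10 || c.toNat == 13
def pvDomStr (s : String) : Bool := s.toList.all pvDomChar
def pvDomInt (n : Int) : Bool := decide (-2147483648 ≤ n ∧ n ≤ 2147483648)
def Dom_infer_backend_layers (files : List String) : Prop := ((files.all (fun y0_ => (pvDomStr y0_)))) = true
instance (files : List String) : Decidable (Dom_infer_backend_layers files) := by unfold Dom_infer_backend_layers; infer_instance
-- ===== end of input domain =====

-- B replaces A's single dispatching pass by a staged sieve: one partition pass per bucket over the remaining files; objective: alternative.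


-- ===== PORT A =====
def pvInitA : PySem.Dict String (List String) :=
  PySem.Dict.ofList [("api", []), ("services", []), ("models", []), ("db", []), ("utils", []), ("unknown", [])]

def pvStepA (layers : PySem.Dict String (List String)) (f : String) : PySem.Dict String (List String) :=
  if PySem.Str.isIn "/api/" f || PySem.Str.isIn "/routes/" f then
    layers.modify "api" [] (· ++ [f])
  else if PySem.Str.isIn "/service/" f || PySem.Str.isIn "/services/" f then
    layers.modify "services" [] (· ++ [f])
  else if PySem.Str.isIn "/model/" f || PySem.Str.isIn "/models/" f || PySem.Str.isIn "/schema/" f then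
    layers.modify "models" [] (· ++ [f])
  else if PySem.Str.isIn "/db/" f || PySem.Str.isIn "/repository/" f then
    layers.modify "db" [] (· ++ [f])
  else if PySem.Str.isIn "/utils/" f || PySem.Str.isIn "/core/" f then
    layers.modify "utils" [] (· ++ [f])
  else
    layers.modify "unknown" [] (· ++ [f])

def infer_backend_layers (files : List String) : List (String × List String) :=
  (files.foldl pvStepA pvInitA).items

-- ===== PORT B =====
-- Source B's RULES table
def pvRulesB : List (String × List String) :=
  [ ("api", ["/api/", "/routes/"]),
    ("services", ["/service/", "/services/"]),
    ("models", ["/model/", "/models/", "/schema/"]),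
    ("db", ["/db/", "/repository/"]),
    ("utils", ["/utils/", "/core/"]) ]

-- Source B's inner loop: split `remaining` into (matched, rest) by appending to one of two lists
def pvSplitB (subs : List String) (remaining : List String) : List String × List String :=
  remaining.foldl
    (fun mr f => if subs.any (fun s => PySem.Str.isIn s f) then (mr.1 ++ [f], mr.2) else (mr.1, mr.2 ++ [f]))
    ([], [])

def infer_backend_layers_alt (files : List String) : List (String × List String) :=
  let res := pvRulesB.foldl
    (fun (acc : List (String × List String) × List String) rule =>
      let mr := pvSplitB rule.2 acc.2
      (acc.1 ++ [(rule.1, mr.1)], mr.2))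
    ([], files)
  res.1 ++ [("unknown", res.2)]

-- ===== PRECONDITION & SPEC =====
def Spec_infer_backend_layers (files : List String) (out : List (String × List String)) : Prop := out = infer_backend_layers_alt files
instance (files : List String) (out : List (String × List String)) : Decidable (Spec_infer_backend_layers files out) := by unfold Spec_infer_backend_layers; infer_instance

-- ===== CLAIM (what is proved, stated in full; the proofs are below) =====
def Claim_equal_infer_backend_layers : Prop := ∀ (files : List String), Dom_infer_backend_layers files → Spec_infer_backend_layers files (infer_backend_layers files)

-- ===== LEMMAS AND PROOFS =====

-- the five match tests, in A's priority order
def pvC1 (f : String) : Bool := PySem.Str.isIn "/api/" f || PySem.Str.isIn "/routes/" f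
def pvC2 (f : String) : Bool := PySem.Str.isIn "/service/" f || PySem.Str.isIn "/services/" f
def pvC3 (f : String) : Bool := PySem.Str.isIn "/model/" f || PySem.Str.isIn "/models/" f || PySem.Str.isIn "/schema/" f
def pvC4 (f : String) : Bool := PySem.Str.isIn "/db/" f || PySem.Str.isIn "/repository/" f
def pvC5 (f : String) : Bool := PySem.Str.isIn "/utils/" f || PySem.Str.isIn "/core/" f

-- pvStepA restated through the named tests (definitional)
theorem pvStepA_eq (layers : PySem.Dict String (List String)) (f : String) :
    pvStepA layers f =
      (if pvC1 f then layers.modify "api" [] (· ++ [f])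
       else if pvC2 f then layers.modify "services" [] (· ++ [f])
       else if pvC3 f then layers.modify "models" [] (· ++ [f])
       else if pvC4 f then layers.modify "db" [] (· ++ [f])
       else if pvC5 f then layers.modify "utils" [] (· ++ [f])
       else layers.modify "unknown" [] (· ++ [f])) := rfl

-- A-side characterization: folding pvStepA over files appends each file to exactly one bucket
theorem pvA_char (files : List String) (la ls lm ld lu lk : List String) :
    (files.foldl pvStepA (PySem.Dict.mk
      [("api", la), ("services", ls), ("models", lm), ("db", ld), ("utils", lu), ("unknown", lk)])).items
    = [("api", la ++ files.filter pvC1),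
       ("services", ls ++ files.filter (fun f => !pvC1 f && pvC2 f)),
       ("models", lm ++ files.filter (fun f => !pvC1 f && !pvC2 f && pvC3 f)),
       ("db", ld ++ files.filter (fun f => !pvC1 f && !pvC2 f && !pvC3 f && pvC4 f)),
       ("utils", lu ++ files.filter (fun f => !pvC1 f && !pvC2 f && !pvC3 f && !pvC4 f && pvC5 f)),
       ("unknown", lk ++ files.filter (fun f => !pvC1 f && !pvC2 f && !pvC3 f && !pvC4 f && !pvC5 f))] := by
  induction files generalizing la ls lm ld lu lk with
  | nil => simp
  | cons f t ih =>
    simp only [List.foldl_cons, pvStepA_eq]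
    cases h1 : pvC1 f <;> cases h2 : pvC2 f <;> cases h3 : pvC3 f <;>
      cases h4 : pvC4 f <;> cases h5 : pvC5 f <;>
      simp [PySem.Dict.modify, PySem.Dict.insert, PySem.Dict.getD, PySem.Dict.get?,
        PySem.Dict.contains, ih, h1, h2, h3, h4, h5]

-- B-side: the two-accumulator split loop is (filter p, filter !p)
theorem pvSplitB_eq (subs : List String) (l : List String) :
    pvSplitB subs l
    = (l.filter (fun f => subs.any (fun s => PySem.Str.isIn s f)),
       l.filter (fun f => !subs.any (fun s => PySem.Str.isIn s f))) := by
  have gen : ∀ (l : List String) (a b : List String),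
      l.foldl (fun mr f => if subs.any (fun s => PySem.Str.isIn s f) then (mr.1 ++ [f], mr.2) else (mr.1, mr.2 ++ [f])) (a, b)
      = (a ++ l.filter (fun f => subs.any (fun s => PySem.Str.isIn s f)),
         b ++ l.filter (fun f => !subs.any (fun s => PySem.Str.isIn s f))) := by
    intro l
    induction l with
    | nil => intro a b; simp
    | cons f t ih =>
      intro a b
      simp only [List.foldl_cons, List.filter_cons]
      cases h : (subs.any fun s => PySem.Str.isIn s f) <;>
        simp only [h, Bool.not_true, Bool.not_false, if_true, if_false, ih,
          Bool.false_eq_true, reduceIte, List.append_assoc, List.singleton_append]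
  unfold pvSplitB
  rw [gen l [] []]
  simp

-- ===== VERDICT (by name: the statement is the Claim_ definition above) =====
theorem infer_backend_layers_spec : Claim_equal_infer_backend_layers := by
  intro files _
  unfold Spec_infer_backend_layers infer_backend_layers infer_backend_layers_alt
  have hinit : pvInitA = PySem.Dict.mk
      [("api", []), ("services", []), ("models", []), ("db", []), ("utils", []), ("unknown", [])] := rfl
  rw [hinit, pvA_char]
  simp only [pvRulesB, List.foldl_cons, List.foldl_nil, pvSplitB_eq, List.nil_append]
  simp only [List.filter_filter, List.cons_append, List.nil_append, List.any_cons,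
    List.any_nil, Bool.or_false]
  unfold pvC1 pvC2 pvC3 pvC4 pvC5
  simp only [Bool.or_comm, Bool.or_left_comm, Bool.or_assoc, Bool.and_comm, Bool.and_left_comm, Bool.and_assoc]
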